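-- pv_equiv track=rewrite | github.com/Dyno-man/Spring_2026_HW | topological_sort.py | get_indegree
-- ===== SOURCE A (Python) =====
-- def get_indegree(graph):
--    nodes = list(graph.keys())
--    count = [0] * len(nodes)
--
--    for items in graph:
--        edges = list(graph[items])
--
--        for keys in nodes:
--            if keys in edges:
--                num = edges.count(keys)
--                ind = nodes.index(keys)
--
--                count[ind] += num
--
--    return count
-- ===== SOURCE B (Python) =====
-- def get_indegree(graph):
--     idx = {node: i for i, node in enumerate(graph)}
--     count = [0] * len(graph)
--     for edges in graph.values():
--         for t in edges:
--             if t in idx: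
--                 count[idx[t]] += 1
--     return count
-- ===== Notes on version B (the rewrite author's own statement) =====
-- stated objective: faster
-- what changed: Replaces the per-source scan over all nodes (with an inner membership test, count and list.index over every node) by a precomputed node->position dict and a single pass over each adjacency list incrementing counts.
import Mathlib
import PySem

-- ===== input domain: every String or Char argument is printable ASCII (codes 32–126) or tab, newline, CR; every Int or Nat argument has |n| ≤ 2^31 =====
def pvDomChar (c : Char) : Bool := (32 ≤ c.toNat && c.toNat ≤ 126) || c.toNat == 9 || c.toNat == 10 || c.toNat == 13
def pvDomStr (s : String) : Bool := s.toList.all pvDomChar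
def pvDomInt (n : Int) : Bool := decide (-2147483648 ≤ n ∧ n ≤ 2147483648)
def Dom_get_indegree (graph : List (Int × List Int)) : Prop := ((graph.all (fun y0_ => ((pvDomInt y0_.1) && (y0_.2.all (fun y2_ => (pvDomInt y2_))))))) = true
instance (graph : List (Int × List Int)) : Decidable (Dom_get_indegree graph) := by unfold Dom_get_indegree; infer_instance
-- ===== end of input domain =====

-- B replaces A's per-source scan over all nodes (membership test + count + list.index each time)
-- by a node->index dict built once and one pass over each adjacency list; objective: faster.

-- ===== PORT A =====
-- inner loop body: 'for keys in nodes: if keys in edges: num = edges.count(keys); ind = nodes.index(keys); count[ind] += num'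
def stepA2 (nodes edges : List Int) (count : List Int) (keys : Int) : List Int :=
  if keys ∈ edges then
    let num : Int := (PySem.List.count edges keys : Int)
    match PySem.List.index? nodes keys with
    | some ind => PySem.List.pySetD count (ind : Int) (PySem.List.pyGetD count (ind : Int) 0 + num)
    | none => count            -- unreachable: keys is drawn from nodes
  else count

-- outer loop body: 'for items in graph: edges = list(graph[items]); <inner loop>'
def stepA1 (d : PySem.Dict Int (List Int)) (nodes : List Int) (count : List Int) (items : Int) : List Int :=
  nodes.foldl (stepA2 nodes (d.getD items [])) count

def get_indegree (graph : List (Int × List Int)) : List Int :=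
  let d := PySem.Dict.ofList graph
  let nodes := d.keys
  let count : List Int := List.replicate nodes.length 0
  nodes.foldl (stepA1 d nodes) count

-- ===== PORT B =====
-- inner loop body: 'for t in edges: if t in idx: count[idx[t]] += 1'
def stepB2 (idx : PySem.Dict Int Int) (count : List Int) (t : Int) : List Int :=
  match idx.get? t with
  | some i => PySem.List.pySetD count i (PySem.List.pyGetD count i 0 + 1)
  | none => count

def stepB1 (idx : PySem.Dict Int Int) (count : List Int) (edges : List Int) : List Int :=
  edges.foldl (stepB2 idx) count

def get_indegree_alt (graph : List (Int × List Int)) : List Int :=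
  let d := PySem.Dict.ofList graph
  let idx : PySem.Dict Int Int :=
    (PySem.List.enumerate d.keys).foldl (fun m p => m.insert p.2 p.1) PySem.Dict.empty
  let count : List Int := List.replicate d.keys.length 0
  d.values.foldl (stepB1 idx) count

-- ===== PRECONDITION & SPEC =====
def Spec_get_indegree (graph : List (Int × List Int)) (out : List Int) : Prop := out = get_indegree_alt graph
instance (graph : List (Int × List Int)) (out : List Int) : Decidable (Spec_get_indegree graph out) := by unfold Spec_get_indegree; infer_instance

-- ===== CLAIM (what is proved, stated in full; the proofs are below) =====
def Claim_equal_get_indegree : Prop := ∀ (graph : List (Int × List Int)), Dom_get_indegree graph → Spec_get_indegree graph (get_indegree graph)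

-- ===== LEMMAS AND PROOFS =====

-- idx built by B maps a node to its (first) index in nodes
theorem mkIdx_get? (nodes : List Int) (hnd : nodes.Nodup) (t : Int) :
    ((PySem.List.enumerate nodes).foldl (fun m p => m.insert p.2 p.1) PySem.Dict.empty).get? t
      = (PySem.List.index? nodes t).map (fun j => (j : Int)) := by
  induction nodes using List.reverseRecOn with
  | nil => simp [PySem.List.enumerate, PySem.Dict.get?_empty, PySem.List.index?_eq_idxOf?]
  | append_singleton ns x ih =>
    have hx : x ∉ ns := by simp [List.nodup_append] at hnd; tauto
    have hns : ns.Nodup := (List.nodup_append.mp hnd).1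
    rw [PySem.List.enumerate_append]
    simp only [List.foldl_append, PySem.List.enumerate, List.foldl]
    rw [PySem.Dict.get?_insert]
    by_cases ht : t = x
    · subst ht
      rw [PySem.List.index?_append_singleton_self ns t hx]
      simp
    · simp only [if_neg ht]
      by_cases hm : t ∈ ns
      · rw [PySem.List.index?_append_of_mem _ hm, ih hns]
      · have h1 : PySem.List.index? ns t = none := by
          rw [PySem.List.index?_eq_none_iff]; exact hm
        have h2 : PySem.List.index? (ns ++ [x]) t = none := by
          rw [PySem.List.index?_eq_none_iff]; simp [hm, ht]
        rw [h2, ih hns, h1]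

theorem getD_set_int (l : List Int) (i j : Nat) (v : Int) (hi : i < l.length) :
    (l.set i v).getD j 0 = if j = i then v else l.getD j 0 := by
  by_cases h : j = i
  · subst h; simp [List.getD_eq_getElem?_getD, hi]
  · have h' : ¬ i = j := fun hh => h hh.symm
    rw [if_neg h, List.getD_eq_getElem?_getD, List.getD_eq_getElem?_getD, List.getElem?_set, if_neg h']

-- B's inner loop over one adjacency list adds, at position j, the occurrences of nodes[j]
theorem foldB_inner_spec (nodes : List Int) (hnd : nodes.Nodup) (ts : List Int) :
    ∀ (count : List Int), count.length = nodes.length →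
      (ts.foldl (stepB2 ((PySem.List.enumerate nodes).foldl (fun m p => m.insert p.2 p.1) PySem.Dict.empty)) count).length = nodes.length
      ∧ ∀ (j : Nat) (hj : j < nodes.length),
          (ts.foldl (stepB2 ((PySem.List.enumerate nodes).foldl (fun m p => m.insert p.2 p.1) PySem.Dict.empty)) count).getD j 0
            = count.getD j 0 + (List.count (nodes[j]) ts : Int) := by
  induction ts with
  | nil => intro count hc; exact ⟨hc, by simp⟩
  | cons t ts ih =>
    intro count hc
    simp only [List.foldl_cons]
    by_cases hm : t ∈ nodes
    · obtain ⟨j0, hj0⟩ : ∃ j0, PySem.List.index? nodes t = some j0 :=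
        Option.isSome_iff_exists.mp ((PySem.List.index?_isSome_iff nodes t).mpr hm)
      obtain ⟨hj0lt, hj0eq, -⟩ := PySem.List.getElem_of_index?_eq_some hj0
      have hj0' : List.idxOf? t nodes = some j0 := by
        rw [← PySem.List.index?_eq_idxOf?]; exact hj0
      have hstep : stepB2 ((PySem.List.enumerate nodes).foldl (fun m p => m.insert p.2 p.1) PySem.Dict.empty) count t
          = count.set j0 (count.getD j0 0 + 1) := by
        simp [stepB2, mkIdx_get? nodes hnd t, hj0', List.getD_eq_getElem?_getD]
      rw [hstep]
      have hc' : (count.set j0 (count.getD j0 0 + 1)).length = nodes.length := by simpa using hc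
      obtain ⟨hl, hv⟩ := ih _ hc'
      refine ⟨hl, fun j hj => ?_⟩
      rw [hv j hj, getD_set_int _ _ _ _ (by omega)]
      by_cases hji : j = j0
      · subst hji
        rw [if_pos rfl, hj0eq, List.count_cons_self]
        push_cast; ring
      · rw [if_neg hji]
        have hne : t ≠ nodes[j] := by
          intro h
          exact hji (hnd.getElem_inj_iff.mp (h.symm.trans hj0eq.symm))
        rw [List.count_cons_of_ne hne]
    · have hstep : stepB2 ((PySem.List.enumerate nodes).foldl (fun m p => m.insert p.2 p.1) PySem.Dict.empty) count t = count := by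
        have h0 : List.idxOf? t nodes = none := by
          rw [← PySem.List.index?_eq_idxOf?, PySem.List.index?_eq_none_iff]; exact hm
        simp [stepB2, mkIdx_get? nodes hnd t, h0]
      rw [hstep]
      obtain ⟨hl, hv⟩ := ih count hc
      refine ⟨hl, fun j hj => ?_⟩
      rw [hv j hj]
      have hne : t ≠ nodes[j] := fun h => hm (h ▸ List.getElem_mem hj)
      rw [List.count_cons_of_ne hne]

-- A's inner loop over a nodup sublist ms of nodes
theorem foldA_inner_spec (nodes edges : List Int) (hnd : nodes.Nodup) :
    ∀ (ms : List Int), ms.Nodup → (∀ m ∈ ms, m ∈ nodes) →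
    ∀ (count : List Int), count.length = nodes.length →
      (ms.foldl (stepA2 nodes edges) count).length = nodes.length
      ∧ ∀ (j : Nat) (hj : j < nodes.length),
          (ms.foldl (stepA2 nodes edges) count).getD j 0
            = count.getD j 0 + (if nodes[j] ∈ ms then (List.count (nodes[j]) edges : Int) else 0) := by
  intro ms
  induction ms with
  | nil => intro _ _ count hc; exact ⟨hc, by simp⟩
  | cons m ms ih =>
    intro hmnd hsub count hc
    obtain ⟨hmnotin, hmsnd⟩ := List.nodup_cons.mp hmnd
    have hmem : m ∈ nodes := hsub m (List.mem_cons_self ..)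
    obtain ⟨j0, hj0⟩ : ∃ j0, PySem.List.index? nodes m = some j0 :=
      Option.isSome_iff_exists.mp ((PySem.List.index?_isSome_iff nodes m).mpr hmem)
    obtain ⟨hj0lt, hj0eq, -⟩ := PySem.List.getElem_of_index?_eq_some hj0
    have hj0c : j0 < count.length := by omega
    have hstep : stepA2 nodes edges count m
        = count.set j0 (count.getD j0 0 + (List.count m edges : Int)) := by
      by_cases he : m ∈ edges
      · have hj0' : List.idxOf? m nodes = some j0 := by
          rw [← PySem.List.index?_eq_idxOf?]; exact hj0
        simp [stepA2, he, hj0', PySem.List.count_eq, List.getD_eq_getElem?_getD]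
      · have h0 : List.count m edges = 0 := List.count_eq_zero.mpr he
        simp only [stepA2, if_neg he, h0]
        push_cast
        rw [add_zero, List.getD_eq_getElem count 0 hj0c, List.set_getElem_self]
    simp only [List.foldl_cons]
    rw [hstep]
    obtain ⟨hl, hv⟩ := ih hmsnd (fun x hx => hsub x (List.mem_cons_of_mem _ hx))
      (count.set j0 (count.getD j0 0 + (List.count m edges : Int))) (by simpa using hc)
    refine ⟨hl, fun j hj => ?_⟩
    rw [hv j hj, getD_set_int _ _ _ _ hj0c]
    by_cases hji : j = j0
    · subst hji
      rw [if_pos rfl, hj0eq]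
      simp [hmnotin]
    · rw [if_neg hji]
      have hne : nodes[j] ≠ m := fun h => hji (hnd.getElem_inj_iff.mp (h.trans hj0eq.symm))
      have hiff : (nodes[j] ∈ m :: ms) ↔ (nodes[j] ∈ ms) := by simp [hne]
      simp only [hiff]

-- A's outer loop over the sources ks
theorem foldA_outer_spec (d : PySem.Dict Int (List Int)) (nodes : List Int) (hnd : nodes.Nodup) :
    ∀ (ks : List Int) (count : List Int), count.length = nodes.length →
      (ks.foldl (stepA1 d nodes) count).length = nodes.length
      ∧ ∀ (j : Nat) (hj : j < nodes.length),
          (ks.foldl (stepA1 d nodes) count).getD j 0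
            = count.getD j 0 + ((ks.map (fun k => (List.count (nodes[j]) (d.getD k []) : Int))).sum) := by
  intro ks
  induction ks with
  | nil => intro count hc; exact ⟨hc, by simp⟩
  | cons k ks ih =>
    intro count hc
    simp only [List.foldl_cons, stepA1]
    obtain ⟨hl1, hv1⟩ := foldA_inner_spec nodes (d.getD k []) hnd nodes hnd (fun _ h => h) count hc
    obtain ⟨hl, hv⟩ := ih _ hl1
    refine ⟨hl, fun j hj => ?_⟩
    rw [hv j hj, hv1 j hj]
    simp only [if_pos (List.getElem_mem hj), List.map_cons, List.sum_cons]
    ring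

-- B's outer loop over the adjacency lists ess
theorem foldB_outer_spec (nodes : List Int) (hnd : nodes.Nodup) :
    ∀ (ess : List (List Int)) (count : List Int), count.length = nodes.length →
      (ess.foldl (stepB1 ((PySem.List.enumerate nodes).foldl (fun m p => m.insert p.2 p.1) PySem.Dict.empty)) count).length = nodes.length
      ∧ ∀ (j : Nat) (hj : j < nodes.length),
          (ess.foldl (stepB1 ((PySem.List.enumerate nodes).foldl (fun m p => m.insert p.2 p.1) PySem.Dict.empty)) count).getD j 0
            = count.getD j 0 + ((ess.map (fun es => (List.count (nodes[j]) es : Int))).sum) := by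
  intro ess
  induction ess with
  | nil => intro count hc; exact ⟨hc, by simp⟩
  | cons es ess ih =>
    intro count hc
    simp only [List.foldl_cons, stepB1]
    obtain ⟨hl1, hv1⟩ := foldB_inner_spec nodes hnd es count hc
    obtain ⟨hl, hv⟩ := ih _ hl1
    refine ⟨hl, fun j hj => ?_⟩
    rw [hv j hj, hv1 j hj]
    simp only [List.map_cons, List.sum_cons]
    ring

-- with nodup keys, mapping getD over the keys recovers the values, in order
theorem values_eq_map_getD (d : PySem.Dict Int (List Int)) (h : d.keys.Nodup) :
    d.keys.map (fun k => d.getD k []) = d.values := by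
  simp only [PySem.Dict.keys, PySem.Dict.values, List.map_map]
  exact List.map_congr_left fun p hp =>
    PySem.Dict.getD_of_mem_items d (by simpa using hp) h []

-- ===== VERDICT (by name: the statement is the Claim_ definition above) =====
theorem get_indegree_spec : Claim_equal_get_indegree := by
  intro graph _
  unfold Spec_get_indegree get_indegree get_indegree_alt
  have hnd : (PySem.Dict.ofList graph).keys.Nodup := PySem.Dict.nodup_keys_ofList graph
  obtain ⟨hAl, hAv⟩ := foldA_outer_spec (PySem.Dict.ofList graph) (PySem.Dict.ofList graph).keys hnd
    (PySem.Dict.ofList graph).keys (List.replicate (PySem.Dict.ofList graph).keys.length 0) (by simp)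
  obtain ⟨hBl, hBv⟩ := foldB_outer_spec (PySem.Dict.ofList graph).keys hnd
    (PySem.Dict.ofList graph).values (List.replicate (PySem.Dict.ofList graph).keys.length 0) (by simp)
  apply List.ext_getElem (by rw [hAl, hBl])
  intro i h1 h2
  have hi : i < (PySem.Dict.ofList graph).keys.length := by rw [← hAl]; exact h1
  rw [← List.getD_eq_getElem _ 0 h1, ← List.getD_eq_getElem _ 0 h2, hAv i hi, hBv i hi,
    ← values_eq_map_getD _ hnd, List.map_map]
  rfl
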